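-- pv_equiv track=rewrite | github.com/CantBeSubh/ProgrammingProjects | Placement/String/03RemoveConsecutive.py | solve
-- ===== SOURCE A (Python) =====
-- def solve(a,b):
--     n=len(a)
--     prev=a[0]
--     res=[]
--     count=1
--     for i in a[1:]:
--         if i==prev:
--             count+=1
--         else:
--             if count==b:
--                 count=1
--             else:
--                 res.append(prev*count)
--                 count=1
--         prev=i
--     if count<b:
--         res.append(prev)
--     return "".join(res)
-- ===== SOURCE B (Python) =====
-- def solve(a, b):
--     # run-length encode, then emit: interior runs kept unless length == b;
--     # the last run contributes a single char iff its length < b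
--     runs = []
--     for ch in a:
--         if runs and runs[-1][0] == ch:
--             runs[-1][1] += 1
--         else:
--             runs.append([ch, 1])
--     parts = [c * n for c, n in runs[:-1] if n != b]
--     if runs and runs[-1][1] < b:
--         parts.append(runs[-1][0])
--     return "".join(parts)
-- ===== Notes on version B (the rewrite author's own statement) =====
-- stated objective: alternative
-- what changed: A's single stateful scan (prev/count/res with in-loop emission and a trailing single-char fixup) is replaced by two separate passes: first a run-length encoding of the string, then an emission pass over the run list (interior runs kept unless length == b, last run contributing one char iff length < b).
import Mathlib
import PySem

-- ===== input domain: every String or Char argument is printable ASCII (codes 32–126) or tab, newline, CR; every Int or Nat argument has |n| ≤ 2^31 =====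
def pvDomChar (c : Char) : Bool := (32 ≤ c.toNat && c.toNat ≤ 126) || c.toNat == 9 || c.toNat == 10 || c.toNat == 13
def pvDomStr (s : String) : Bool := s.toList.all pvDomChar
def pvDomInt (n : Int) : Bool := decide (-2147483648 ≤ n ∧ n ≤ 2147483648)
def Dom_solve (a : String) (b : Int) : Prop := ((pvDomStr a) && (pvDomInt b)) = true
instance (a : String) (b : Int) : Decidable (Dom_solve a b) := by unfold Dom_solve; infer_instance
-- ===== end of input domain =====

-- B re-implements A as run-length-encode-then-emit (two plain passes) instead of A's
-- single stateful scan; same return value wherever A returns (A raises IndexError on "").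

-- ===== PORT A =====
-- one pass: state (res, prev, count); on run change, drop the run iff count == b
def solveStep (b : Int) (s : List (List Char) × Char × Int) (i : Char) :
    List (List Char) × Char × Int :=
  match s with
  | (res, prev, count) =>
    if i = prev then (res, prev, count + 1)
    else if count = b then (res, i, 1)
    else (res ++ [List.replicate count.toNat prev], i, 1)

def solve (a : String) (b : Int) : String :=
  match a.toList with
  | [] => ""          -- Python raises IndexError here (a[0]); excluded by Pre_solve
  | p :: rest =>
    match rest.foldl (solveStep b) ([], p, 1) with
    | (res, prev, count) =>
      String.ofList (if count < b then res ++ [[prev]] else res).flatten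

-- ===== PORT B =====
-- pass 1: run-length encoding (mutating the last run ↦ dropLast ++ [updated])
def altStep (runs : List (Char × Int)) (ch : Char) : List (Char × Int) :=
  match runs.getLast? with
  | some (c, n) => if c = ch then runs.dropLast ++ [(c, n + 1)] else runs ++ [(ch, 1)]
  | none => [(ch, 1)]

-- pass 2: interior runs kept unless length = b; last run gives one char iff length < b
def solve_alt (a : String) (b : Int) : String :=
  let runs := a.toList.foldl altStep []
  let parts := (runs.dropLast.filter (fun p => p.2 ≠ b)).map
      (fun p => List.replicate p.2.toNat p.1)
  let parts := parts ++ (match runs.getLast? with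
    | some (c, n) => if n < b then [[c]] else []
    | none => [])
  String.ofList parts.flatten

-- ===== PRECONDITION & SPEC =====
-- A evaluates a[0] first, so it raises IndexError on the empty string; excluded.
def Pre_solve (a : String) (b : Int) : Prop := a ≠ ""
instance (a : String) (b : Int) : Decidable (Pre_solve a b) := by unfold Pre_solve; infer_instance
def pvWitness_solve : String × Int := ("aab", 2)

def Spec_solve (a : String) (b : Int) (out : String) : Prop := out = solve_alt a b
instance (a : String) (b : Int) (out : String) : Decidable (Spec_solve a b out) := by unfold Spec_solve; infer_instance

-- ===== CLAIM (what is proved, stated in full; the proofs are below) =====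
def Claim_equal_solve : Prop := ∀ (a : String) (b : Int), Dom_solve a b → Pre_solve a b → Spec_solve a b (solve a b)

-- ===== LEMMAS AND PROOFS =====

/-- Canonical recursive form of the emitted pieces, shared target of both ports. -/
def emit (b : Int) (prev : Char) (count : Int) : List Char → List (List Char)
  | [] => if count < b then [[prev]] else []
  | i :: rest =>
    if i = prev then emit b prev (count + 1) rest
    else if count = b then emit b i 1 rest
    else List.replicate count.toNat prev :: emit b i 1 rest

def finishA (b : Int) (s : List (List Char) × Char × Int) : List (List Char) :=
  match s with
  | (res, prev, count) => if count < b then res ++ [[prev]] else res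

theorem foldA_emit (b : Int) :
    ∀ (rest : List Char) (res : List (List Char)) (prev : Char) (count : Int),
      finishA b (rest.foldl (solveStep b) (res, prev, count)) = res ++ emit b prev count rest := by
  intro rest
  induction rest with
  | nil =>
    intro res prev count
    simp only [List.foldl_nil, finishA, emit]
    split <;> simp
  | cons i rest ih =>
    intro res prev count
    simp only [List.foldl_cons, solveStep, emit]
    by_cases h1 : i = prev
    · simp [h1, ih]
    · by_cases h2 : count = b
      · simp [h1, h2, ih]
      · simp [h1, h2, ih]

/-- Canonical recursive form of B's run-length encoding. -/
def runsOf (prev : Char) (count : Int) : List Char → List (Char × Int)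
  | [] => [(prev, count)]
  | i :: rest =>
    if i = prev then runsOf prev (count + 1) rest
    else (prev, count) :: runsOf i 1 rest

theorem altStep_extend (prev : Char) (count : Int) (ch : Char) :
    altStep [(prev, count)] ch =
      if prev = ch then [(prev, count + 1)] else [(prev, count)] ++ [(ch, 1)] := by
  simp only [altStep, List.getLast?]
  split <;> simp_all

theorem altStep_concat (runs : List (Char × Int)) (prev : Char) (count : Int) (ch : Char) :
    altStep (runs ++ [(prev, count)]) ch =
      if prev = ch then runs ++ [(prev, count + 1)]
      else (runs ++ [(prev, count)]) ++ [(ch, 1)] := by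
  simp only [altStep, List.getLast?_concat]
  split <;> simp_all

theorem foldB_prefix :
    ∀ (rest : List Char) (runs : List (Char × Int)) (prev : Char) (count : Int),
      rest.foldl altStep (runs ++ [(prev, count)]) = runs ++ rest.foldl altStep [(prev, count)] := by
  intro rest
  induction rest with
  | nil => intro runs prev count; simp
  | cons i rest ih =>
    intro runs prev count
    rw [List.foldl_cons, List.foldl_cons, altStep_concat, altStep_extend]
    by_cases h : prev = i
    · simp only [if_pos h, ih]
    · simp only [if_neg h]
      rw [ih (runs ++ [(prev, count)]) i 1, ih [(prev, count)] i 1]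
      simp

theorem foldB_runsOf :
    ∀ (rest : List Char) (prev : Char) (count : Int),
      rest.foldl altStep [(prev, count)] = runsOf prev count rest := by
  intro rest
  induction rest with
  | nil => intro prev count; simp [runsOf]
  | cons i rest ih =>
    intro prev count
    rw [List.foldl_cons, altStep_extend, runsOf]
    by_cases h : i = prev
    · simp [h, ih]
    · have h' : ¬ prev = i := fun e => h e.symm
      rw [if_neg h', foldB_prefix, ih, if_neg h]
      rfl

theorem runsOf_ne_nil (rest : List Char) (prev : Char) (count : Int) :
    runsOf prev count rest ≠ [] := by
  induction rest generalizing prev count with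
  | nil => simp [runsOf]
  | cons i rest ih =>
    simp only [runsOf]
    split
    · exact ih _ _
    · simp

def finishB (b : Int) (runs : List (Char × Int)) : List (List Char) :=
  ((runs.dropLast.filter (fun p => p.2 ≠ b)).map (fun p => List.replicate p.2.toNat p.1)) ++
    (match runs.getLast? with
     | some (c, n) => if n < b then [[c]] else []
     | none => [])

theorem finishB_emit (b : Int) :
    ∀ (rest : List Char) (prev : Char) (count : Int),
      finishB b (runsOf prev count rest) = emit b prev count rest := by
  intro rest
  induction rest with
  | nil => intro prev count; simp [runsOf, finishB, emit]
  | cons i rest ih =>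
    intro prev count
    simp only [runsOf, emit]
    by_cases h1 : i = prev
    · simp [h1, ih]
    · simp only [if_neg h1]
      obtain ⟨r, R, hR⟩ : ∃ r R, runsOf i 1 rest = r :: R := by
        cases hc : runsOf i 1 rest with
        | nil => exact absurd hc (runsOf_ne_nil _ _ _)
        | cons r R => exact ⟨r, R, rfl⟩
      have key : finishB b ((prev, count) :: runsOf i 1 rest) =
          (if count = b then [] else [List.replicate count.toNat prev]) ++
            finishB b (runsOf i 1 rest) := by
        rw [hR]
        simp only [finishB, List.dropLast_cons₂, List.getLast?_cons_cons, List.filter_cons]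
        by_cases h2 : count = b <;> simp [h2]
      rw [key, ih]
      by_cases h2 : count = b <;> simp [h2]

-- ===== VERDICT (by name: the statement is the Claim_ definition above) =====
theorem solve_spec : Claim_equal_solve := by
  intro a b _ hpre
  unfold Spec_solve
  cases hl : a.toList with
  | nil => exact absurd (String.toList_eq_nil_iff.mp hl) hpre
  | cons p rest =>
    unfold solve solve_alt
    rw [hl]
    have hB : (p :: rest).foldl altStep [] = runsOf p 1 rest := by
      have h0 : altStep [] p = [(p, 1)] := by simp [altStep, List.getLast?]
      rw [List.foldl_cons, h0, foldB_runsOf]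
    have hE := finishB_emit b rest p 1
    simp only [finishB] at hE
    have hA := foldA_emit b rest [] p 1
    rcases hfa : rest.foldl (solveStep b) ([], p, 1) with ⟨res, prev, count⟩
    rw [hfa] at hA
    simp only [finishA, List.nil_append] at hA
    simp only [hB, hE, ← hA, hfa]
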